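-- pv_equiv track=rewrite | github.com/itb2/Various-Python-Assignments | Cs101/sp15_cps101_asg4_transform/src/Transforms.py | transform_pigify
-- ===== SOURCE A (Python) =====
-- def transform_pigify (word):
--     '''Encode into Pig-latin from English.
--        Note, when transforming the string word,
--              do not change its capitalization or punctuation.
--        Note, this transformation is not unique,
--              some different words may be transformed into the same pig-latin word.
--     '''
--     # TODO: complete this function so that it returns a new version of the string word,
--     #       assuming word is in English, use the rules of pig-latin to encode the word
--     vowels = ["a","e","i","o","u","A","E", "I", "O", "U"]
--     if word[0] == "q" or word[0]== "Q":
--         word = word[2:] + "-" + word[0] +"u" + "ay"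
--         return word
--     mini = len(word)
--     for v in vowels:
--         x = word.find(v)
--         if x >= 0 and x < mini:             #This is an edited version of my apt piglatin that also
--             mini = x                        #accounts for words that have no vowels and treats them as if
--     if mini == 0 or mini == len(word):      #the first letter is a vowel.
--         word = word + "-" + "way"
--         return word
--
--     word = word[mini:] + "-" + word[:mini] + "ay"
--     return word
-- ===== SOURCE B (Python) =====
-- VOWELS = set("aeiouAEIOU")
--
-- def transform_pigify(word):
--     first = word[0]
--     if first == "q" or first == "Q":
--         return word[2:] + "-" + first + "uay"
--     for i, ch in enumerate(word):
--         if ch in VOWELS: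
--             idx = i
--             break
--     else:
--         idx = len(word)
--     if idx == 0 or idx == len(word):
--         return word + "-way"
--     return word[idx:] + "-" + word[:idx] + "ay"
-- ===== Notes on version B (the rewrite author's own statement) =====
-- stated objective: simpler
-- what changed: Replaces the loop over the ten vowels that calls word.find for each and minimises, with a single left-to-right scan over the characters that stops at the first vowel (len(word) as sentinel when none).
import Mathlib
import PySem

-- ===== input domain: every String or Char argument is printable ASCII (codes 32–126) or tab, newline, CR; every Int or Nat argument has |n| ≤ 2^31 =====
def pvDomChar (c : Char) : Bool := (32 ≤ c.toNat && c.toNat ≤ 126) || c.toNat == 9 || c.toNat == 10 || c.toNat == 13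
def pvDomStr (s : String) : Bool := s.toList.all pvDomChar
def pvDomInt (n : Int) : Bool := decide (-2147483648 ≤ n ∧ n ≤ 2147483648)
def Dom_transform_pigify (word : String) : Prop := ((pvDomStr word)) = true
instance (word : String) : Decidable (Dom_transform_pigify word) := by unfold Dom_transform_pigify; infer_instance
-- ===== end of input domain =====

-- B replaces A's ten-vowel find-and-minimise loop by one left-to-right scan stopping at the first vowel (simpler).

-- ===== PORT A =====
def pvVowels : List Char := ['a','e','i','o','u','A','E','I','O','U']

def transform_pigify (word : String) : String :=
  let cs := word.toList
  -- word[0]; Pre_ guarantees cs ≠ [], so the default is never read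
  let c0 := PySem.List.pyGetD cs 0 ' '
  if c0 = 'q' ∨ c0 = 'Q' then
    String.ofList (PySem.List.slice cs (some 2) none ++ "-".toList ++ [c0] ++ "u".toList ++ "ay".toList)
  else
    let mini : Int := pvVowels.foldl (fun mini v =>
      let x := PySem.Chars.find cs [v]
      if 0 ≤ x ∧ x < mini then x else mini) (cs.length : Int)
    if mini = 0 ∨ mini = (cs.length : Int) then
      String.ofList (cs ++ "-way".toList)
    else
      String.ofList (PySem.List.slice cs (some mini) none ++ "-".toList ++
                     PySem.List.slice cs none (some mini) ++ "ay".toList)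

-- ===== PORT B =====
def pvIsVowel (c : Char) : Bool := c ∈ "aeiouAEIOU".toList

-- the for/else scan of Source B: index of the first vowel, length when none
def pvFirstVowelIdx : List Char → Nat
  | [] => 0
  | c :: rest => if pvIsVowel c then 0 else pvFirstVowelIdx rest + 1

def transform_pigify_alt (word : String) : String :=
  let cs := word.toList
  let first := PySem.List.pyGetD cs 0 ' '
  if first = 'q' ∨ first = 'Q' then
    String.ofList (cs.drop 2 ++ '-' :: first :: "uay".toList)
  else
    let idx := pvFirstVowelIdx cs
    if idx = 0 ∨ idx = cs.length then
      String.ofList (cs ++ "-way".toList)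
    else
      String.ofList (cs.drop idx ++ '-' :: (cs.take idx ++ "ay".toList))

-- ===== PRECONDITION & SPEC =====
-- A evaluates word[0], which raises IndexError on the empty string; both programs raise there.
def Pre_transform_pigify (word : String) : Prop := word ≠ ""
instance (word : String) : Decidable (Pre_transform_pigify word) := by unfold Pre_transform_pigify; infer_instance
def pvWitness_transform_pigify : String := "pig"

def Spec_transform_pigify (word : String) (out : String) : Prop := out = transform_pigify_alt word
instance (word : String) (out : String) : Decidable (Spec_transform_pigify word out) := by unfold Spec_transform_pigify; infer_instance

-- ===== CLAIM =====
def Claim_equal_transform_pigify : Prop := ∀ (word : String), Dom_transform_pigify word → Pre_transform_pigify word → Spec_transform_pigify word (transform_pigify word)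

-- ===== LEMMAS AND PROOFS =====

theorem pvFirstVowelIdx_le (cs : List Char) : pvFirstVowelIdx cs ≤ cs.length := by
  induction cs with
  | nil => simp [pvFirstVowelIdx]
  | cons c r ih => simp [pvFirstVowelIdx]; split <;> omega

-- if the scan did not run off the end it stopped on a vowel
theorem pvFirstVowelIdx_get (cs : List Char) (h : pvFirstVowelIdx cs < cs.length) :
    pvIsVowel (cs.get ⟨pvFirstVowelIdx cs, h⟩) = true := by
  induction cs with
  | nil => simp at h
  | cons c r ih =>
    by_cases hv : pvIsVowel c
    · simp [pvFirstVowelIdx, hv]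
    · simp [pvFirstVowelIdx, hv] at h ⊢
      exact ih (by omega)

theorem pvFirstVowelIdx_min (cs : List Char) (i : Nat) (hi : i < cs.length)
    (hv : pvIsVowel (cs.get ⟨i, hi⟩) = true) : pvFirstVowelIdx cs ≤ i := by
  induction cs generalizing i with
  | nil => simp at hi
  | cons c r ih =>
    cases i with
    | zero => simp at hv; simp [pvFirstVowelIdx, hv]
    | succ k =>
      by_cases hc : pvIsVowel c
      · simp [pvFirstVowelIdx, hc]
      · simp [pvFirstVowelIdx, hc]
        have := ih k (by simpa using hi) (by simpa using hv)
        omega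

theorem pvVowel_mem (c : Char) : pvIsVowel c = true ↔ c ∈ pvVowels := by
  simp [pvIsVowel, pvVowels]

theorem single_prefix_drop (v : Char) (cs : List Char) (t : Nat) :
    [v] <+: cs.drop t ↔ cs[t]? = some v := by
  rw [← List.head?_drop]
  constructor
  · rintro ⟨r, h⟩; rw [← h]; rfl
  · intro h
    cases hd : cs.drop t with
    | nil => rw [hd] at h; simp at h
    | cons a r => rw [hd] at h; simp at h; exact ⟨r, by simp [h]⟩

theorem find_get (cs : List Char) (v : Char) (h : 0 ≤ PySem.Chars.find cs [v]) :
    cs[(PySem.Chars.find cs [v]).toNat]? = some v := by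
  have := (PySem.Chars.find_spec h).1
  rwa [single_prefix_drop] at this

theorem find_le (cs : List Char) (v : Char) (t : Nat) (h : cs[t]? = some v) :
    0 ≤ PySem.Chars.find cs [v] ∧ (PySem.Chars.find cs [v]).toNat ≤ t := by
  have hpre := (single_prefix_drop v cs t).2 h
  have hnn : 0 ≤ PySem.Chars.find cs [v] := by
    rw [PySem.Chars.find_nonneg_iff]
    exact hpre.isInfix.trans (cs.drop_suffix t).isInfix
  refine ⟨hnn, ?_⟩
  by_contra hlt
  exact (PySem.Chars.find_spec hnn).2 t (by omega) hpre

-- A's find-and-minimise fold computes J when J bounds every successful find from below,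
-- J bounds the accumulator, and J is reached by some vowel or is the accumulator itself.
theorem foldMin (cs : List Char) (J : Int) (hJ : 0 ≤ J) :
    ∀ (V : List Char) (m : Int),
    (∀ v ∈ V, 0 ≤ PySem.Chars.find cs [v] → J ≤ PySem.Chars.find cs [v]) →
    J ≤ m →
    ((∃ v ∈ V, PySem.Chars.find cs [v] = J) ∨ m = J) →
    V.foldl (fun mini v =>
      let x := PySem.Chars.find cs [v]
      if 0 ≤ x ∧ x < mini then x else mini) m = J := by
  intro V
  induction V with
  | nil =>
    intro m _ _ h3
    rcases h3 with ⟨v, hv, _⟩ | h3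
    · simp at hv
    · simpa using h3
  | cons v V ih =>
    intro m hub hJm h3
    rw [List.foldl_cons]
    set x := PySem.Chars.find cs [v] with hx
    have hub' : ∀ u ∈ V, 0 ≤ PySem.Chars.find cs [u] → J ≤ PySem.Chars.find cs [u] :=
      fun u hu => hub u (List.mem_cons_of_mem v hu)
    have hxJ : 0 ≤ x → J ≤ x := hub v List.mem_cons_self
    show V.foldl _ (if 0 ≤ x ∧ x < m then x else m) = J
    rcases h3 with ⟨u, hu, hfind⟩ | h3
    · rcases List.mem_cons.1 hu with rfl | huV
      · -- the head vowel attains J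
        rw [← hx] at hfind
        split
        · exact ih x (by omega) (by omega) (Or.inr hfind)
        · exact ih m hub' hJm (Or.inr (by omega))
      · -- some later vowel attains J
        have hm' : J ≤ if 0 ≤ x ∧ x < m then x else m := by
          split
          · exact hxJ (by omega)
          · exact hJm
        exact ih _ hub' hm' (Or.inl ⟨u, huV, hfind⟩)
    · subst h3
      have : ¬ (0 ≤ x ∧ x < m) := by intro ⟨h1, h2⟩; have := hxJ h1; omega
      rw [if_neg this]
      exact ih m hub' le_rfl (Or.inr rfl)

-- A's minimum over the vowel finds is exactly B's first-vowel index
theorem fold_eq_firstVowelIdx (cs : List Char) :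
    pvVowels.foldl (fun mini v =>
      let x := PySem.Chars.find cs [v]
      if 0 ≤ x ∧ x < mini then x else mini) (cs.length : Int)
    = (pvFirstVowelIdx cs : Int) := by
  set J := pvFirstVowelIdx cs with hJdef
  have hJle : J ≤ cs.length := pvFirstVowelIdx_le cs
  have hub : ∀ v ∈ pvVowels, 0 ≤ PySem.Chars.find cs [v] → (J : Int) ≤ PySem.Chars.find cs [v] := by
    intro v hv hnn
    have hget := find_get cs v hnn
    have htlt : (PySem.Chars.find cs [v]).toNat < cs.length := by
      rcases List.getElem?_eq_some_iff.1 hget with ⟨h, _⟩; exact h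
    rcases List.getElem?_eq_some_iff.1 hget with ⟨hlt, hgv⟩
    have hvow : pvIsVowel (cs.get ⟨(PySem.Chars.find cs [v]).toNat, hlt⟩) = true := by
      simp only [List.get_eq_getElem, hgv]
      exact (pvVowel_mem v).2 hv
    have := pvFirstVowelIdx_min cs _ hlt hvow
    omega
  apply foldMin cs (J : Int) (by omega) pvVowels (cs.length : Int) hub (by omega)
  by_cases hlt : J < cs.length
  · left
    have hvow := pvFirstVowelIdx_get cs hlt
    set v0 := cs.get ⟨J, hlt⟩ with hv0
    have hget : cs[J]? = some v0 := by
      simp [hv0]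
    have hle := find_le cs v0 J hget
    refine ⟨v0, (pvVowel_mem v0).1 hvow, ?_⟩
    have := hub v0 ((pvVowel_mem v0).1 hvow) hle.1
    omega
  · right; omega



-- ===== VERDICT =====
theorem transform_pigify_spec : Claim_equal_transform_pigify := by
  intro word _ _
  unfold Spec_transform_pigify transform_pigify transform_pigify_alt
  set cs := word.toList with hcs
  simp only []
  split
  · -- q/Q branch
    congr 1
    rw [show (2:Int) = ((2:Nat):Int) from rfl, PySem.List.slice_from_natCast]
    simp
  · rw [fold_eq_firstVowelIdx cs]
    set J := pvFirstVowelIdx cs with hJ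
    by_cases h0 : J = 0 ∨ J = cs.length
    · rw [if_pos (show (J : Int) = 0 ∨ (J : Int) = (cs.length : Int) by omega), if_pos h0]
    · rw [if_neg (show ¬ ((J : Int) = 0 ∨ (J : Int) = (cs.length : Int)) by omega), if_neg h0]
      congr 1
      rw [PySem.List.slice_from_natCast, PySem.List.slice_to_natCast]
      simp
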